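-- pv_equiv track=rewrite | github.com/ziul123/truth-table-generator | truth-table.py | paren
-- ===== SOURCE A (Python) =====
-- def paren(str1):
-- 	"""Identify the most nested pair of parenthesis."""
-- 	tmp = ''
-- 	for i in range(str1.find(')'),-1,-1):
-- 		if str1[i] == '(':
-- 			tmp += str1[i]
-- 			break
-- 		tmp += str1[i]
-- 	return tmp[::-1]
-- ===== SOURCE B (Python) =====
-- def paren(str1):
-- 	"""Identify the most nested pair of parenthesis."""
-- 	# One forward pass: remember the last '(' seen; at the first ')' slice it out.
-- 	last_open = -1
-- 	for i, c in enumerate(str1):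
-- 		if c == '(':
-- 			last_open = i
-- 		elif c == ')':
-- 			return str1[max(last_open, 0):i + 1]
-- 	return ''
-- ===== Notes on version B (the rewrite author's own statement) =====
-- stated objective: alternative
-- what changed: A locates the first ')' with find, then scans backward character by character building a reversed string and reverses it at the end; B makes a single left-to-right pass tracking the index of the most recent '(' and returns a direct slice at the first ')'.
import Mathlib
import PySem

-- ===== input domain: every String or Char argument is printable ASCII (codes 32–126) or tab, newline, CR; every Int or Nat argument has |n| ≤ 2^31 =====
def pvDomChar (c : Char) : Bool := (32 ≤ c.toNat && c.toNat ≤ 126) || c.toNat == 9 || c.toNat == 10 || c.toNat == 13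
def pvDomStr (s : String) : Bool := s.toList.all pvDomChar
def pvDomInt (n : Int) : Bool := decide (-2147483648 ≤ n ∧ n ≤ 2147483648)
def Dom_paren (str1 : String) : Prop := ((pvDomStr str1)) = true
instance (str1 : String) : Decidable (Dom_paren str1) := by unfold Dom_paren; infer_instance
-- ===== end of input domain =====

-- B replaces A's find-then-backward-scan-and-reverse with one forward pass that tracks the
-- last '(' index and slices at the first ')' (alternative decomposition, same O(n) cost).

-- ===== PORT A =====
-- for i in range(str1.find(')'), -1, -1): … build tmp, break at '('
def parenRangeA (s : List Char) : List Int → List Char → List Char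
  | [], tmp => tmp
  | i :: rest, tmp =>
    match PySem.List.pyGet? s i with
    | none => tmp  -- unreachable: every index produced by the range is valid (Python would raise here)
    | some c => if c = '(' then tmp ++ [c] else parenRangeA s rest (tmp ++ [c])

def paren (str1 : String) : String :=
  match PySem.List.slice? (parenRangeA str1.toList
      (PySem.List.pyRange (PySem.Chars.find str1.toList [')']) (-1) (-1)) [])
      none none (-1) with  -- tmp[::-1]
  | some r => String.ofList r
  | none => String.ofList []  -- unreachable: step -1 ≠ 0

-- ===== PORT B =====
-- for i, c in enumerate(str1): track last_open, return slice at first ')'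
def parenScanB (s : List Char) : List (Int × Char) → Int → List Char
  | [], _ => []
  | (i, c) :: rest, lastOpen =>
    if c = '(' then parenScanB s rest i
    else if c = ')' then PySem.List.slice s (some (max lastOpen 0)) (some (i + 1))
    else parenScanB s rest lastOpen

def paren_alt (str1 : String) : String :=
  String.ofList (parenScanB str1.toList (PySem.List.enumerate str1.toList 0) (-1))

-- ===== PRECONDITION & SPEC =====
def Spec_paren (str1 : String) (out : String) : Prop := out = paren_alt str1
instance (str1 : String) (out : String) : Decidable (Spec_paren str1 out) := by unfold Spec_paren; infer_instance

-- ===== CLAIM (what is proved, stated in full; the proofs are below) =====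
def Claim_equal_paren : Prop := ∀ (str1 : String), Dom_paren str1 → Spec_paren str1 (paren str1)

-- ===== LEMMAS AND PROOFS =====

-- A's tmp, seen from the reversed prefix: take until (and including) the first '('.
def cutA : List Char → List Char
  | [] => []
  | c :: t => if c = '(' then [c] else c :: cutA t

-- index of the LAST '(' in a list, if any
def lastOpen? : List Char → Option Nat
  | [] => none
  | c :: t =>
    match lastOpen? t with
    | some m => some (m + 1)
    | none => if c = '(' then some 0 else none

theorem lastOpen?_append_singleton (l : List Char) (a : Char) :
    lastOpen? (l ++ [a]) = if a = '(' then some l.length else lastOpen? l := by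
  induction l with
  | nil => simp [lastOpen?]
  | cons c t ih =>
    simp only [List.cons_append, lastOpen?, ih]
    by_cases ha : a = '('
    · simp [ha]
    · simp [ha]

theorem lastOpen?_lt_length (l : List Char) (j : Nat) (h : lastOpen? l = some j) :
    j < l.length := by
  induction l generalizing j with
  | nil => simp [lastOpen?] at h
  | cons c t ih =>
    simp only [lastOpen?] at h
    cases hm : lastOpen? t with
    | some m =>
      rw [hm] at h; simp at h; have := ih m hm; simp; omega
    | none =>
      rw [hm] at h
      by_cases hc : c = '(' <;> simp [hc] at h
      simp; omega

-- A's backward loop computes cutA of the reversed prefix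
theorem parenRangeA_eq_cutA (s : List Char) (n : Nat) (acc : List Char) (hn : n < s.length) :
    parenRangeA s (PySem.List.pyRange (n : Int) (-1) (-1)) acc
      = acc ++ cutA (s.take (n + 1)).reverse := by
  induction n generalizing acc with
  | zero =>
    rw [PySem.List.pyRange_neg_one_cons (by norm_num)]
    simp only [parenRangeA, show ((0 : Nat) : Int) - 1 = -1 by norm_num,
      PySem.List.pyRange_neg_one_eq_nil (le_refl (-1 : Int))]
    rw [show ((0 : Nat) : Int) = ((0 : Nat) : Int) from rfl, PySem.List.pyGet?_natCast]
    rw [List.getElem?_eq_getElem hn]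
    have htake : (s.take 1).reverse = [s[0]] := by
      rw [List.take_add_one]; simp [List.getElem?_eq_getElem hn]
    rw [htake]
    simp only [cutA]
    by_cases hc : s[0] = '(' <;> simp [hc]
  | succ m ih =>
    rw [PySem.List.pyRange_neg_one_cons (by omega)]
    simp only [parenRangeA, PySem.List.pyGet?_natCast]
    rw [List.getElem?_eq_getElem hn]
    have htake : (s.take (m + 1 + 1)).reverse = s[m+1] :: (s.take (m + 1)).reverse := by
      rw [List.take_add_one]; simp [List.getElem?_eq_getElem hn]
    rw [htake]
    simp only [cutA]
    have hstep : ((m + 1 : Nat) : Int) - 1 = ((m : Nat) : Int) := by push_cast; ring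
    by_cases hc : s[m+1] = '('
    · simp [hc]
    · simp only [hc, if_false]
      rw [hstep, ih (acc ++ [s[m+1]]) (by omega)]
      simp

-- reversing cutA of the reverse drops everything before the last '('
theorem cutA_reverse_eq_drop (l : List Char) :
    (cutA l.reverse).reverse = l.drop ((lastOpen? l).getD 0) := by
  induction l using List.reverseRecOn with
  | nil => simp [cutA, lastOpen?]
  | append_singleton t a ih =>
    rw [lastOpen?_append_singleton]
    have hrev : (t ++ [a]).reverse = a :: t.reverse := by simp
    rw [hrev]
    simp only [cutA]
    by_cases ha : a = '(' <;> simp only [ha, if_true, if_false]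
    · simp [List.drop_append_of_le_length (le_refl t.length)]
    · have hj : (lastOpen? t).getD 0 ≤ t.length := by
        cases hlo : lastOpen? t with
        | none => simp
        | some j => simpa using le_of_lt (lastOpen?_lt_length t j hlo)
      rw [List.reverse_cons, ih, List.drop_append_of_le_length hj]

-- B's forward loop, characterized by the first ')' and the last '(' before it
theorem parenScanB_eq (s : List Char) (l : List Char) (k : Nat) (lo : Int) :
    parenScanB s (PySem.List.enumerate l (k : Int)) lo
      = match List.findIdx? (fun c => c = ')') l with
        | none => []
        | some m => PySem.List.slice s
            (some (max (match lastOpen? (l.take m) with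
                        | some j => ((k + j : Nat) : Int)
                        | none => lo) 0))
            (some (((k + m : Nat) : Int) + 1)) := by
  induction l generalizing k lo with
  | nil => simp [PySem.List.enumerate, parenScanB]
  | cons c t ih =>
    have henum : PySem.List.enumerate (c :: t) (k : Int)
        = ((k : Int), c) :: PySem.List.enumerate t (((k + 1 : Nat) : Int)) := by
      push_cast
      simp [PySem.List.enumerate]
    rw [henum]
    simp only [parenScanB, List.findIdx?_cons]
    by_cases hc : c = '('
    · have hcne : c ≠ ')' := by simp [hc]
      rw [if_pos hc, ih (k + 1) ((k : Int)), if_neg (by simp [hcne])]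
      cases hf : List.findIdx? (fun c => c = ')') t with
      | none => rfl
      | some m' =>
        simp only [Option.map_some, List.take_succ_cons, lastOpen?, hc, if_true]
        cases hlo : lastOpen? (t.take m') with
        | none =>
          simp only
          rw [show k + 1 + m' = k + (m' + 1) from by omega, show k + 0 = k from rfl]
        | some j =>
          simp only
          rw [show k + 1 + j = k + (j + 1) from by omega,
            show k + 1 + m' = k + (m' + 1) from by omega]
    · by_cases hc2 : c = ')'
      · rw [if_neg hc, if_pos hc2, if_pos (by simp [hc2])]
        simp only [List.take_zero, lastOpen?]
        rw [show ((k + 0 : Nat) : Int) = (k : Nat) from by norm_num]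
      · rw [if_neg hc, if_neg hc2, ih (k + 1) lo, if_neg (by simp [hc2])]
        cases hf : List.findIdx? (fun c => c = ')') t with
        | none => rfl
        | some m' =>
          simp only [Option.map_some, List.take_succ_cons, lastOpen?, hc, if_false]
          cases hlo : lastOpen? (t.take m') with
          | none =>
            simp only
            rw [show k + 1 + m' = k + (m' + 1) from by omega]
          | some j =>
            simp only
            rw [show k + 1 + j = k + (j + 1) from by omega,
              show k + 1 + m' = k + (m' + 1) from by omega]

theorem findIdx?_eq_some_of (p : Char → Bool) (l : List Char) (n : Nat) (hn : n < l.length)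
    (h1 : p l[n] = true) (h2 : ∀ i (hi : i < n), p (l[i]'(by omega)) = false) :
    List.findIdx? p l = some n := by
  induction l generalizing n with
  | nil => simp at hn
  | cons c t ih =>
    rw [List.findIdx?_cons]
    cases n with
    | zero => simp_all
    | succ m =>
      have hc : p c = false := h2 0 (by omega)
      rw [hc]
      simp only [Bool.false_eq_true, if_false]
      rw [ih m (by simpa using hn) (by simpa using h1)
        (fun i hi => by simpa using h2 (i + 1) (by omega))]
      rfl

-- ===== VERDICT (by name: the statement is the Claim_ definition above) =====
theorem paren_spec : Claim_equal_paren := by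
  intro str1 _
  unfold Spec_paren paren paren_alt
  set s := str1.toList with hs
  by_cases hmem : ')' ∈ s
  · -- there is a ')' : find it
    have hge : 0 ≤ PySem.Chars.find s [')'] := by
      rw [PySem.Chars.find_nonneg_iff, List.singleton_infix_iff]; exact hmem
    obtain ⟨hpre, hmin⟩ := PySem.Chars.find_spec hge
    set n := (PySem.Chars.find s [')']).toNat with hn
    have hfn : PySem.Chars.find s [')'] = (n : Int) := by omega
    obtain ⟨r, hr⟩ := hpre
    have hlen : n < s.length := by
      have h2 := congrArg List.length hr
      simp at h2
      omega
    have hsn : s[n] = ')' := by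
      have h0 : (List.drop n s)[0]'(by simp; omega) = ')' := by
        simp only [← hr]
        rfl
      simpa using h0
    have hbefore : ∀ i (hi : i < n), s[i] ≠ ')' := by
      intro i hi hcontra
      apply hmin i hi
      refine ⟨List.drop (i + 1) s, ?_⟩
      rw [show ([')'] ++ List.drop (i + 1) s) = ')' :: List.drop (i + 1) s from rfl, ← hcontra]
      exact List.getElem_cons_drop (by omega)
    -- A side
    rw [hfn, parenRangeA_eq_cutA s n [] hlen, List.nil_append,
      PySem.List.slice?_none_none_neg_one]
    simp only
    rw [cutA_reverse_eq_drop]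
    -- B side
    rw [show (0 : Int) = ((0 : Nat) : Int) from rfl, parenScanB_eq s s 0 (-1)]
    rw [findIdx?_eq_some_of _ s n hlen (by simp [hsn]) (fun i hi => by simp [hbefore i hi])]
    simp only [Nat.zero_add]
    -- relate lastOpen? of take (n+1) and take n
    have htake1 : s.take (n + 1) = s.take n ++ [s[n]] := by
      rw [List.take_add_one]; simp [List.getElem?_eq_getElem hlen]
    have hlo1 : lastOpen? (s.take (n + 1)) = lastOpen? (s.take n) := by
      rw [htake1, lastOpen?_append_singleton]
      simp [hsn]
    rw [hlo1]
    have hnlen : n + 1 ≤ s.length := by omega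
    cases hlo : lastOpen? (s.take n) with
    | none =>
      simp only [Option.getD_none]
      rw [show max (-1 : Int) 0 = 0 from rfl, PySem.List.slice_zero_start,
        PySem.List.slice_to s (by positivity)]
      rw [List.drop_zero, show ((n : Int) + 1).toNat = n + 1 from by omega]
    | some j =>
      have hj : j < n := by
        have := lastOpen?_lt_length _ _ hlo
        simpa [List.length_take, Nat.lt_min] using this.trans_le (by simp [List.length_take])
      simp only [Option.getD_some]
      rw [show max ((j : Nat) : Int) 0 = ((j : Nat) : Int) from by omega]
      rw [PySem.List.slice_of_nonneg s (by positivity) (by positivity)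
        (by exact_mod_cast le_of_lt (lt_of_lt_of_le hj (by omega)))
        (by exact_mod_cast hnlen)]
      rw [List.drop_take, show (((n : Nat) : Int) + 1).toNat = n + 1 from by omega,
        show ((j : Nat) : Int).toNat = j from by omega]
  · -- no ')' anywhere: both return ""
    have hfind : PySem.Chars.find s [')'] = -1 := by
      rw [PySem.Chars.find_eq_neg_one_iff, List.singleton_infix_iff]; exact hmem
    rw [hfind, PySem.List.pyRange_neg_one_eq_nil (le_refl (-1 : Int))]
    simp only [parenRangeA, PySem.List.slice?_none_none_neg_one, List.reverse_nil]
    rw [show (0 : Int) = ((0 : Nat) : Int) from rfl, parenScanB_eq s s 0 (-1)]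
    rw [List.findIdx?_eq_none_iff.mpr (fun x hx => by
      simp only [decide_eq_false_iff_not]
      intro hxe; exact hmem (hxe ▸ hx))]
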